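-- pv_equiv track=rewrite | github.com/facebookresearch/fairo | droidlet/memory/filters_conversions.py | match_symbol
-- ===== SOURCE A (Python) =====
-- def match_symbol(text, pidx=0, s=("(", ")")):
--     """
--     given an opening and closing pair of symbols
--     defaulting to "(" and ")",
--     returns the index in the text str where (the start of)
--     a closing instance of the pair matches the first opening
--     instance of the pair at or after idx.
--     if the pair is umnmatched, returns -1
--     """
--     assert s[0] != s[1]
--     opened = False
--     open_count = 0
--     i = pidx
--     L = len(text)
--     while i < L:
--         if text[i : min(i + len(s[0]), L)] == s[0]:
--             open_count += 1
--             opened = True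
--             i = i + len(s[0])
--         elif text[i : min(i + len(s[1]), L)] == s[1] and opened:
--             open_count -= 1
--             if open_count == 0:
--                 return i
--             i = i + len(s[1])
--         else:
--             i += 1
--
--     return -1
-- ===== SOURCE B (Python) =====
-- def match_symbol(text, pidx=0, s=("(", ")")):
--     """Occurrence-hopping re-implementation: jump between str.find results of the
--     opening and closing symbols instead of stepping char by char."""
--     assert s[0] != s[1]
--     count = 0
--     i = pidx
--     while True:
--         no = text.find(s[0], i)
--         if count == 0:
--             if no == -1:
--                 return -1
--             count = 1
--             i = no + len(s[0])
--         else: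
--             nc = text.find(s[1], i)
--             if no != -1 and (nc == -1 or no <= nc):
--                 count += 1
--                 i = no + len(s[0])
--             elif nc != -1:
--                 count -= 1
--                 if count == 0:
--                     return nc
--                 i = nc + len(s[1])
--             else:
--                 return -1
-- ===== Notes on version B (the rewrite author's own statement) =====
-- stated objective: faster
-- what changed: replaces A's char-by-char scan with an `opened` flag by occurrence-hopping: each iteration jumps straight to the next str.find occurrence of the opening/closing symbol (ties broken for the opener), keeping only the nesting counter
-- outside the precondition, e.g. on match_symbol('()', -2, ('(', ')')): A returns -1, B returns 1; on match_symbol('(', 0, ('(', '')): A returns -1, B returns 1; on match_symbol('ab', 2, ('', ')')): A returns -1, B does not finish within the time limit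
import Mathlib
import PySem

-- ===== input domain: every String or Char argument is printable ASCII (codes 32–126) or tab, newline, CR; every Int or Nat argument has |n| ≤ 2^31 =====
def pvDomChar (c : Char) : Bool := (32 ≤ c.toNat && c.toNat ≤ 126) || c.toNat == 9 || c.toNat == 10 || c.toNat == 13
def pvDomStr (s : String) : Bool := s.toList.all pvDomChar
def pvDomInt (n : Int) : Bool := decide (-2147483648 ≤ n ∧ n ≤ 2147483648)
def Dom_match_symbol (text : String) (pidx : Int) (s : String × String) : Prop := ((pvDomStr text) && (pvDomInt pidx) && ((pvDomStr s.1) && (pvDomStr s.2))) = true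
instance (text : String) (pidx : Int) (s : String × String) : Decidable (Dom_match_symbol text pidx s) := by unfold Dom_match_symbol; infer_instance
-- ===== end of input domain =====

-- B replaces A's char-by-char scan (with an `opened` flag) by occurrence-hopping between
-- str.find results of the two symbols; same return value on Pre_ (no argument is mutated).

-- ===== PORT A =====
-- the while-loop of A; fuel only makes the recursion structural (inside Pre_ every
-- iteration advances i by at least 1, so the fuel passed below is never exhausted)
def matchAGo (t s0 s1 : List Char) : Bool → Int → Int → Nat → Int
  | _, _, _, 0 => -1
  | opened, cnt, i, f+1 =>
    if i < (t.length : Int) then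
      if PySem.List.slice t (some i) (some (min (i + (s0.length : Int)) (t.length : Int))) = s0 then
        matchAGo t s0 s1 true (cnt + 1) (i + (s0.length : Int)) f
      else if PySem.List.slice t (some i) (some (min (i + (s1.length : Int)) (t.length : Int))) = s1 ∧ opened = true then
        if cnt - 1 = 0 then i
        else matchAGo t s0 s1 opened (cnt - 1) (i + (s1.length : Int)) f
      else matchAGo t s0 s1 opened cnt (i + 1) f
    else -1

-- `assert s[0] != s[1]` raises AssertionError when s.1 = s.2; those inputs are outside Pre_.
def match_symbol (text : String) (pidx : Int) (s : String × String) : Int :=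
  matchAGo text.toList s.1.toList s.2.toList false 0 pidx
    (2 * ((text.toList.length : Int) - pidx).toNat + 1)

-- ===== PORT B =====
-- the while-True loop of Source B: hop between find results (fuel as above, never exhausted on Pre_)
def matchBGo (t s0 s1 : List Char) : Int → Int → Nat → Int
  | _, _, 0 => -1
  | cnt, i, f+1 =>
    if cnt = 0 then
      if PySem.Chars.findFrom t s0 i none = -1 then -1
      else matchBGo t s0 s1 1 (PySem.Chars.findFrom t s0 i none + (s0.length : Int)) f
    else
      if PySem.Chars.findFrom t s0 i none ≠ -1 ∧
          (PySem.Chars.findFrom t s1 i none = -1 ∨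
            PySem.Chars.findFrom t s0 i none ≤ PySem.Chars.findFrom t s1 i none) then
        matchBGo t s0 s1 (cnt + 1) (PySem.Chars.findFrom t s0 i none + (s0.length : Int)) f
      else if PySem.Chars.findFrom t s1 i none ≠ -1 then
        if cnt - 1 = 0 then PySem.Chars.findFrom t s1 i none
        else matchBGo t s0 s1 (cnt - 1) (PySem.Chars.findFrom t s1 i none + (s1.length : Int)) f
      else -1

def match_symbol_alt (text : String) (pidx : Int) (s : String × String) : Int :=
  matchBGo text.toList s.1.toList s.2.toList 0 pidx
    (2 * ((text.toList.length : Int) - pidx).toNat + 1)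

-- ===== PRECONDITION & SPEC =====
-- Pre_ restricts to the natural domain of the helper: a nonnegative start index and nonempty,
-- distinct symbols.  Excluded: s.1 = s.2 (A's assert raises); s.1 = "" (both programs loop
-- forever when pidx < len(text)); s.2 = "" (A's char scan and B's find-hopping read the
-- empty close differently at end of string — an unspecified degenerate corner); pidx < 0
-- (Python's negative-slice reading of a start index is equally unspecified here: A's slices
-- wrap around while B's find clamps, two defensible readings).
def Pre_match_symbol (text : String) (pidx : Int) (s : String × String) : Prop :=
  0 ≤ pidx ∧ s.1 ≠ s.2 ∧ s.1 ≠ "" ∧ s.2 ≠ ""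
instance (text : String) (pidx : Int) (s : String × String) : Decidable (Pre_match_symbol text pidx s) := by unfold Pre_match_symbol; infer_instance

def pvWitness_match_symbol : String × Int × (String × String) := ("a(b(c))d", 0, ("(", ")"))

def Spec_match_symbol (text : String) (pidx : Int) (s : String × String) (out : Int) : Prop := out = match_symbol_alt text pidx s
instance (text : String) (pidx : Int) (s : String × String) (out : Int) : Decidable (Spec_match_symbol text pidx s out) := by unfold Spec_match_symbol; infer_instance

-- ===== CLAIM (what is proved, stated in full; the proofs are below) =====
def Claim_equal_match_symbol : Prop := ∀ (text : String) (pidx : Int) (s : String × String), Dom_match_symbol text pidx s → Pre_match_symbol text pidx s → Spec_match_symbol text pidx s (match_symbol text pidx s)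

-- ===== LEMMAS AND PROOFS =====

lemma find_go_shift (sub : List Char) : ∀ (m : List Char) (k : Nat),
    PySem.Chars.find.go sub m k =
      if PySem.Chars.find.go sub m 0 = -1 then -1 else PySem.Chars.find.go sub m 0 + (k : Int) := by
  intro m
  induction m with
  | nil =>
    intro k
    simp only [PySem.Chars.find.go]
    by_cases h : sub.isEmpty <;> simp [h]
  | cons c t ih =>
    intro k
    simp only [PySem.Chars.find.go]
    by_cases h : sub.isPrefixOf (c :: t)
    · simp [h]
    · simp only [h]
      rw [ih (k+1), ih 1]
      by_cases h2 : PySem.Chars.find.go sub t 0 = -1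
      · simp [h2]
      · have hge : (0:Int) ≤ PySem.Chars.find.go sub t 0 := by
          have := PySem.Chars.neg_one_le_find t sub
          simp only [PySem.Chars.find] at this
          omega
        have : PySem.Chars.find.go sub t 0 + 1 ≠ -1 := by omega
        simp only [h2, if_false]
        push_cast
        rw [if_neg (by omega : ¬ (PySem.Chars.find.go sub t 0 + 1 = -1))]
        ring

lemma find_cons (sub : List Char) (c : Char) (m : List Char) :
    PySem.Chars.find (c :: m) sub =
      if sub <+: (c :: m) then 0
      else if PySem.Chars.find m sub = -1 then -1 else PySem.Chars.find m sub + 1 := by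
  simp only [PySem.Chars.find, PySem.Chars.find.go]
  by_cases h : sub <+: (c :: m)
  · simp [List.isPrefixOf_iff_prefix.mpr h, h]
  · have hb : sub.isPrefixOf (c :: m) = false := by
      rw [Bool.eq_false_iff]; intro hc; exact h (List.isPrefixOf_iff_prefix.mp hc)
    simp only [hb, if_false, h, if_false, Bool.false_eq_true]
    rw [find_go_shift]
    norm_num

lemma find_of_prefix {sub l : List Char} (h : sub <+: l) : PySem.Chars.find l sub = 0 := by
  cases l with
  | nil =>
    have : sub = [] := List.prefix_nil.mp h
    subst this
    simp [PySem.Chars.find, PySem.Chars.find.go]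
  | cons c t => rw [find_cons]; simp [h]

lemma findFrom_hit {t sub : List Char} {n : Nat} (hn : n ≤ t.length) (h : sub <+: t.drop n) :
    PySem.Chars.findFrom t sub (n : Int) none = (n : Int) := by
  rw [PySem.Chars.findFrom_natCast t sub n hn, find_of_prefix h]
  norm_num

lemma findFrom_step {t sub : List Char} {n : Nat} (hn : n < t.length) (h : ¬ sub <+: t.drop n) :
    PySem.Chars.findFrom t sub (n : Int) none = PySem.Chars.findFrom t sub ((n : Int) + 1) := by
  have h1 : ((n : Int) + 1) = ((n + 1 : Nat) : Int) := by push_cast; ring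
  rw [PySem.Chars.findFrom_natCast t sub n (le_of_lt hn), h1,
    PySem.Chars.findFrom_natCast t sub (n+1) hn]
  rw [List.drop_eq_getElem_cons hn] at h ⊢
  rw [find_cons]
  simp only [h]
  by_cases h2 : PySem.Chars.find (t.drop (n+1)) sub = -1
  · simp [h2]
  · have hge : (0:Int) ≤ PySem.Chars.find (t.drop (n+1)) sub := by
      have := PySem.Chars.neg_one_le_find (t.drop (n+1)) sub
      omega
    have : PySem.Chars.find (t.drop (n+1)) sub + 1 ≠ -1 := by omega
    simp only [h2, if_false, this, if_false]
    push_cast; ring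

lemma findFrom_lb (t sub : List Char) {n : Nat} (hn : n ≤ t.length) :
    PySem.Chars.findFrom t sub (n : Int) none = -1 ∨ (n : Int) ≤ PySem.Chars.findFrom t sub (n : Int) none := by
  rw [PySem.Chars.findFrom_natCast t sub n hn]
  by_cases h : PySem.Chars.find (t.drop n) sub = -1
  · left; simp [h]
  · right
    have := PySem.Chars.neg_one_le_find (t.drop n) sub
    rw [if_neg h]
    omega

lemma findFrom_end {t sub : List Char} (hs : sub ≠ []) :
    PySem.Chars.findFrom t sub (t.length : Int) none = -1 := by
  rw [PySem.Chars.findFrom_natCast t sub t.length le_rfl]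
  have h1 : PySem.Chars.find (t.drop t.length) sub = -1 := by
    rw [PySem.Chars.find_eq_neg_one_iff]
    simp [List.infix_nil, hs]
  rw [if_pos h1]

lemma findFrom_past (t sub : List Char) {i : Int} (hi : (t.length : Int) < i) :
    PySem.Chars.findFrom t sub i none = -1 := by
  simp only [PySem.Chars.findFrom]
  have h1 : ¬ i < 0 := by omega
  simp only [h1, if_false]
  rw [if_pos hi]

lemma slice_eq_iff_prefix (t sub : List Char) (n : Nat) :
    PySem.List.slice t (some (n : Int)) (some (min ((n : Int) + (sub.length : Int)) (t.length : Int))) = sub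
      ↔ sub <+: t.drop n := by
  have hb : (0:Int) ≤ min ((n : Int) + (sub.length : Int)) (t.length : Int) := by
    have : (0:Int) ≤ (n : Int) + (sub.length : Int) := by positivity
    omega
  rw [PySem.List.slice_toNat t (by positivity) hb]
  have htn : (min ((n : Int) + (sub.length : Int)) (t.length : Int)).toNat - (n:Int).toNat
      = min sub.length (t.length - n) := by omega
  rw [htn, Int.toNat_natCast]
  have hlen : (t.drop n).length = t.length - n := List.length_drop
  have key : (t.drop n).take (min sub.length (t.length - n)) = (t.drop n).take sub.length := by
    rw [← hlen, ← List.take_take, List.take_length]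
  rw [key, eq_comm]
  exact (List.prefix_iff_eq_take).symm



lemma loops_eq (t s0 s1 : List Char) (h0 : s0 ≠ []) (h1 : s1 ≠ []) :
    ∀ (μ : Nat), ∀ (n : Nat) (cnt : Int) (opened : Bool) (f g : Nat),
      n ≤ t.length →
      ((opened = false ∧ cnt = 0) ∨ (opened = true ∧ 1 ≤ cnt)) →
      2 * (t.length - n) + cnt.toNat + 1 ≤ μ → μ ≤ f → μ ≤ g →
      matchAGo t s0 s1 opened cnt (n : Int) f = matchBGo t s0 s1 cnt (n : Int) g := by
  intro μ
  induction μ using Nat.strong_induction_on with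
  | _ μ ih =>
  intro n cnt opened f g hn hinv hμ hf hg
  have h0len : 0 < s0.length := List.length_pos_iff.mpr h0
  have h1len : 0 < s1.length := List.length_pos_iff.mpr h1
  obtain ⟨f', rfl⟩ : ∃ f', f = f' + 1 := ⟨f - 1, by omega⟩
  obtain ⟨g', rfl⟩ : ∃ g', g = g' + 1 := ⟨g - 1, by omega⟩
  by_cases hnL : n < t.length
  · have hlt : ((n : Int) < (t.length : Int)) := by exact_mod_cast hnL
    by_cases hA0 : s0 <+: t.drop n
    · -- open step
      have hno : PySem.Chars.findFrom t s0 (n : Int) none = (n : Int) :=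
        findFrom_hit (le_of_lt hnL) hA0
      have hfit : n + s0.length ≤ t.length := by
        have := hA0.length_le; rw [List.length_drop] at this; omega
      have hcast : (n : Int) + (s0.length : Int) = ((n + s0.length : Nat) : Int) := by
        push_cast; ring
      have hAstep : matchAGo t s0 s1 opened cnt (n : Int) (f' + 1)
          = matchAGo t s0 s1 true (cnt + 1) ((n + s0.length : Nat) : Int) f' := by
        simp only [matchAGo]
        rw [if_pos hlt, if_pos ((slice_eq_iff_prefix t s0 n).mpr hA0), hcast]
      rw [hAstep]
      rcases hinv with ⟨hop, hc⟩ | ⟨hop, hc⟩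
      · -- cnt = 0
        subst hc
        have hBstep : matchBGo t s0 s1 0 (n : Int) (g' + 1)
            = matchBGo t s0 s1 1 ((n + s0.length : Nat) : Int) g' := by
          simp only [matchBGo, if_true]
          rw [hno, if_neg (by omega : ¬ ((n : Int) = -1)), hcast]
        rw [hBstep]
        have : (0 : Int) + 1 = 1 := by ring
        rw [this]
        exact ih (μ - 1) (by omega) (n + s0.length) 1 true f' g' hfit
          (Or.inr ⟨rfl, le_refl 1⟩) (by simp; omega) (by omega) (by omega)
      · -- cnt ≥ 1
        have hc0 : ¬ (cnt = 0) := by omega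
        have hBstep : matchBGo t s0 s1 cnt (n : Int) (g' + 1)
            = matchBGo t s0 s1 (cnt + 1) ((n + s0.length : Nat) : Int) g' := by
          simp only [matchBGo]
          rw [if_neg hc0, hno]
          have hcond : ((n : Int) ≠ -1 ∧
              (PySem.Chars.findFrom t s1 (n : Int) none = -1 ∨
               (n : Int) ≤ PySem.Chars.findFrom t s1 (n : Int) none)) := by
            refine ⟨by omega, ?_⟩
            exact findFrom_lb t s1 (le_of_lt hnL)
          rw [if_pos hcond, hcast]
        rw [hBstep]
        exact ih (μ - 1) (by omega) (n + s0.length) (cnt + 1) true f' g' hfit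
          (Or.inr ⟨rfl, by omega⟩) (by omega) (by omega) (by omega)
    · -- no open at n
      have hsl0 : ¬ (PySem.List.slice t (some (n : Int))
          (some (min ((n : Int) + (s0.length : Int)) (t.length : Int))) = s0) :=
        fun h => hA0 ((slice_eq_iff_prefix t s0 n).mp h)
      have hstep0 : PySem.Chars.findFrom t s0 (n : Int) none
          = PySem.Chars.findFrom t s0 ((n : Int) + 1) none := findFrom_step hnL hA0
      have hcast1 : (n : Int) + 1 = ((n + 1 : Nat) : Int) := by push_cast; ring
      rcases hinv with ⟨hop, hc⟩ | ⟨hop, hc⟩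
      · -- cnt = 0, opened = false : inert
        subst hc; subst hop
        have hAstep : matchAGo t s0 s1 false 0 (n : Int) (f' + 1)
            = matchAGo t s0 s1 false 0 ((n + 1 : Nat) : Int) f' := by
          simp only [matchAGo]
          rw [if_pos hlt, if_neg hsl0, if_neg (by simp), hcast1]
        have hBstep : matchBGo t s0 s1 0 (n : Int) (g' + 1)
            = matchBGo t s0 s1 0 ((n + 1 : Nat) : Int) (g' + 1) := by
          conv_lhs => simp only [matchBGo, if_true]
          conv_rhs => simp only [matchBGo, if_true]
          rw [hstep0, hcast1]
        rw [hAstep, hBstep]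
        exact ih (μ - 2) (by omega) (n + 1) 0 false f' (g' + 1) (by omega)
          (Or.inl ⟨rfl, rfl⟩) (by simp; omega) (by omega) (by omega)
      · -- opened = true, cnt ≥ 1
        subst hop
        have hc0 : ¬ (cnt = 0) := by omega
        by_cases hA1 : s1 <+: t.drop n
        · -- close step
          have hnc : PySem.Chars.findFrom t s1 (n : Int) none = (n : Int) :=
            findFrom_hit (le_of_lt hnL) hA1
          have hfit1 : n + s1.length ≤ t.length := by
            have := hA1.length_le; rw [List.length_drop] at this; omega
          have hcastB : (n : Int) + (s1.length : Int) = ((n + s1.length : Nat) : Int) := by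
            push_cast; ring
          have hopenF : ¬ (PySem.Chars.findFrom t s0 (n : Int) none ≠ -1 ∧
              (PySem.Chars.findFrom t s1 (n : Int) none = -1 ∨
               PySem.Chars.findFrom t s0 (n : Int) none ≤ PySem.Chars.findFrom t s1 (n : Int) none)) := by
            rw [hstep0, hnc, hcast1]
            rcases findFrom_lb t s0 (n := n + 1) (by omega) with hm | hm
            · rw [hm]; simp
            · rintro ⟨hne, hor⟩
              rcases hor with hx | hx
              · omega
              · push_cast at hm hx; omega
          have hAcond : (PySem.List.slice t (some (n : Int))
              (some (min ((n : Int) + (s1.length : Int)) (t.length : Int))) = s1 ∧ True) :=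
            ⟨(slice_eq_iff_prefix t s1 n).mpr hA1, trivial⟩
          by_cases hdone : cnt - 1 = 0
          · have hA : matchAGo t s0 s1 true cnt (n : Int) (f' + 1) = (n : Int) := by
              simp only [matchAGo]
              rw [if_pos hlt, if_neg hsl0, if_pos hAcond, if_pos hdone]
            have hB : matchBGo t s0 s1 cnt (n : Int) (g' + 1) = (n : Int) := by
              simp only [matchBGo]
              rw [if_neg hc0, if_neg hopenF, hnc,
                if_pos (by omega : ((n:Int) ≠ -1)), if_pos hdone]
            rw [hA, hB]
          · have hA : matchAGo t s0 s1 true cnt (n : Int) (f' + 1)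
                = matchAGo t s0 s1 true (cnt - 1) ((n + s1.length : Nat) : Int) f' := by
              simp only [matchAGo]
              rw [if_pos hlt, if_neg hsl0, if_pos hAcond, if_neg hdone, hcastB]
            have hB : matchBGo t s0 s1 cnt (n : Int) (g' + 1)
                = matchBGo t s0 s1 (cnt - 1) ((n + s1.length : Nat) : Int) g' := by
              simp only [matchBGo]
              rw [if_neg hc0, if_neg hopenF, hnc,
                if_pos (by omega : ((n:Int) ≠ -1)), if_neg hdone, hcastB]
            rw [hA, hB]
            exact ih (μ - 1) (by omega) (n + s1.length) (cnt - 1) true f' g' hfit1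
              (Or.inr ⟨rfl, by omega⟩) (by omega) (by omega) (by omega)
        · -- inert, opened
          have hsl1 : ¬ (PySem.List.slice t (some (n : Int))
              (some (min ((n : Int) + (s1.length : Int)) (t.length : Int))) = s1 ∧ True) := by
            rintro ⟨h, -⟩; exact hA1 ((slice_eq_iff_prefix t s1 n).mp h)
          have hstep1 : PySem.Chars.findFrom t s1 (n : Int) none
              = PySem.Chars.findFrom t s1 ((n : Int) + 1) none := findFrom_step hnL hA1
          have hAstep : matchAGo t s0 s1 true cnt (n : Int) (f' + 1)
              = matchAGo t s0 s1 true cnt ((n + 1 : Nat) : Int) f' := by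
            simp only [matchAGo]
            rw [if_pos hlt, if_neg hsl0, if_neg hsl1, hcast1]
          have hBstep : matchBGo t s0 s1 cnt (n : Int) (g' + 1)
              = matchBGo t s0 s1 cnt ((n + 1 : Nat) : Int) (g' + 1) := by
            conv_lhs => simp only [matchBGo]
            conv_rhs => simp only [matchBGo]
            rw [if_neg hc0, if_neg hc0, hstep0, hstep1, hcast1]
          rw [hAstep, hBstep]
          exact ih (μ - 2) (by omega) (n + 1) cnt true f' (g' + 1) (by omega)
            (Or.inr ⟨rfl, by omega⟩) (by omega) (by omega) (by omega)
  · -- n = t.length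
    have hEq : n = t.length := by omega
    subst hEq
    have hA : matchAGo t s0 s1 opened cnt (t.length : Int) (f' + 1) = -1 := by
      simp only [matchAGo]
      rw [if_neg (by omega : ¬ ((t.length : Int) < (t.length : Int)))]
    have hno := findFrom_end (t := t) h0
    have hnc := findFrom_end (t := t) h1
    have hB : matchBGo t s0 s1 cnt (t.length : Int) (g' + 1) = -1 := by
      simp only [matchBGo]
      by_cases hc0 : cnt = 0
      · rw [if_pos hc0, hno, if_pos rfl]
      · rw [if_neg hc0, if_neg (by rw [hno]; simp), if_neg (by rw [hnc]; simp)]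
    rw [hA, hB]

-- ===== VERDICT (by name: the statement is the Claim_ definition above) =====
theorem match_symbol_spec : Claim_equal_match_symbol := by
  intro text pidx s hdom hpre
  obtain ⟨hpx, hne, hs1, hs2⟩ := hpre
  unfold Spec_match_symbol match_symbol match_symbol_alt
  have h0 : s.1.toList ≠ [] := fun h => hs1 (String.toList_inj.mp (by rw [h]; rfl))
  have h1 : s.2.toList ≠ [] := fun h => hs2 (String.toList_inj.mp (by rw [h]; rfl))
  obtain ⟨n, rfl⟩ : ∃ n : Nat, pidx = (n : Int) := ⟨pidx.toNat, by omega⟩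
  by_cases hn : n ≤ text.toList.length
  · have hfuel : ((text.toList.length : Int) - (n : Int)).toNat = text.toList.length - n := by
      omega
    rw [hfuel]
    exact loops_eq text.toList s.1.toList s.2.toList h0 h1
      (2 * (text.toList.length - n) + 1) n 0 false _ _ hn (Or.inl ⟨rfl, rfl⟩)
      (by simp) (by omega) (by omega)
  · have hfuel : ((text.toList.length : Int) - (n : Int)).toNat = 0 := by omega
    rw [hfuel]
    have hgt : (text.toList.length : Int) < (n : Int) := by
      exact_mod_cast by omega
    have hA : matchAGo text.toList s.1.toList s.2.toList false 0 (n : Int) (2 * 0 + 1) = -1 := by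
      simp only [matchAGo]
      rw [if_neg (by omega : ¬ ((n : Int) < (text.toList.length : Int)))]
    have hB : matchBGo text.toList s.1.toList s.2.toList 0 (n : Int) (2 * 0 + 1) = -1 := by
      simp only [matchBGo, if_true]
      rw [findFrom_past text.toList s.1.toList hgt, if_pos rfl]
    rw [hA, hB]
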